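-- pv_equiv track=rewrite | github.com/privateCodingFlo/Uni | EPROG/Serie06/2.py | LxV
-- ===== SOURCE A (Python) =====
-- def LxV(L, vector):
--     """
--     Berechnet das Produkt einer unteren Dreiecksmatrix L (als verschachtelte Liste)
--     mit einem Vektor v (als Liste) und gibt das Ergebnis y = L * v zurück.
--
--     L: Untere Dreiecksmatrix (Liste von Listen)
--     vector: Vektor v (Liste)
--
--     Die Berechnung erfolgt nur für die Elemente, bei denen der Spaltenindex j
--     kleiner oder gleich dem Zeilenindex i ist (y_i = Summe_{j=1}^{i} L_ij * v_j).
--     """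
--
--     n = len(L)
--     # 1. Überprüfen der Kompatibilität (quadratische Matrix und korrekte Vektorlänge)
--     if n != len(vector) or any(len(row) != n for row in L):
--         raise ValueError(
--             "Matrix L muss quadratisch sein und ihre Dimension muss der Länge des Vektors entsprechen.")
--
--     # 2. Initialisieren des Ergebnisvektors y mit Nullen
--     y = [0] * n
--
--     # 3. Schleife über die Zeilen der Matrix L (entspricht dem Index i in y_i)
--     for i in range(n):
--         sum_val = 0
--
--         # 4. Schleife über die Spalten der Matrix L (entspricht dem Index j in L_ij)
--         # Die Summe läuft von j=0 bis j=i (n-1 in der 0-basierten Indexierung),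
--         # wodurch die Nulleinträge oberhalb der Diagonalen (j > i) ignoriert werden.
--         # Dies erfüllt die Anforderung, nicht auf offensichtliche Null-Einträge zuzugreifen.
--         for j in range(i + 1):
--             # Berechnung des Terms L_ij * v_j und Aufsummieren
--             sum_val += L[i][j] * vector[j]
--
--         # 5. Speichern des berechneten Elements y_i
--         y[i] = sum_val
--
--     return y
-- ===== SOURCE B (Python) =====
-- def LxV(L, vector):
--     n = len(L)
--     if n != len(vector) or any(len(row) != n for row in L):
--         raise ValueError(
--             "Matrix L muss quadratisch sein und ihre Dimension muss der Länge des Vektors entsprechen.")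
--     # consume the matrix back-to-front: pop the last row, take its dot product
--     # with the current vector (zip truncates the row to the triangular prefix),
--     # shrink the vector, and finally flip the reversed results
--     rows = list(L)
--     vec = list(vector)
--     ys = []
--     while rows:
--         last = rows.pop()
--         ys.append(sum(a * b for a, b in zip(last, vec)))
--         vec.pop()
--     ys.reverse()
--     return ys
-- ===== Notes on version B (the rewrite author's own statement) =====
-- stated objective: alternative
-- what changed: Instead of indexed row-wise dot products into a preallocated array, B consumes the matrix back-to-front with pop, using zip-truncation against a shrinking vector to select each row's triangular prefix, and reverses the accumulated results at the end; no index arithmetic at all.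
import Mathlib
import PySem

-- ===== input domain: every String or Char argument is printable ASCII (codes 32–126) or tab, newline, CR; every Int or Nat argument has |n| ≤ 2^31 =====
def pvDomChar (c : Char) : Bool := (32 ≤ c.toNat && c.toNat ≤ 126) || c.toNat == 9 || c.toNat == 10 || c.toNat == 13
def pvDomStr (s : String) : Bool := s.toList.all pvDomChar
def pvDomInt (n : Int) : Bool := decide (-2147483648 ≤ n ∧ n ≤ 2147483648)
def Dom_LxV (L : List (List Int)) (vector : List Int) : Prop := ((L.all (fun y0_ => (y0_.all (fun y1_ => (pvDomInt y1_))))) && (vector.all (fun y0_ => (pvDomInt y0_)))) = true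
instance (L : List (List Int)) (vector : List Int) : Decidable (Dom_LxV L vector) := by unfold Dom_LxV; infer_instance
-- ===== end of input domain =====

-- B replaces indexed row-wise dot products by a back-to-front pop loop with zip-truncated
-- dot products against a shrinking vector, reversing the accumulated results at the end.

-- ===== PORT A =====
-- row-wise: for i in range(n): sum over j in range(i+1); y[i] = sum
def LxV (L : List (List Int)) (vector : List Int) : List Int :=
  let n := L.length
  (List.range n).foldl
    (fun y i =>
      y.set i ((List.range (i + 1)).foldl
        (fun s j => s + (L.getD i []).getD j 0 * vector.getD j 0) 0))
    (List.replicate n 0)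

-- ===== PORT B =====
-- sum(a*b for a, b in zip(last, vec))
def pvDot (last vec : List Int) : Int :=
  (last.zip vec).foldl (fun s p => s + p.1 * p.2) 0

-- while rows: last = rows.pop(); ys.append(dot); vec.pop()
def pvLoop : List (List Int) → List Int → List Int → List Int
  | [], _, ys => ys
  | r :: rs, vec, ys =>
    pvLoop (r :: rs).dropLast vec.dropLast (ys ++ [pvDot ((r :: rs).getLast (by simp)) vec])
termination_by rows _ _ => rows.length
decreasing_by simp

def LxV_alt (L : List (List Int)) (vector : List Int) : List Int :=
  (pvLoop L vector []).reverse

-- ===== PRECONDITION & SPEC =====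
-- Pre_ excludes exactly the inputs where A raises ValueError (non-square L or mismatched vector length)
def Pre_LxV (L : List (List Int)) (vector : List Int) : Prop :=
  vector.length = L.length ∧ ∀ row ∈ L, row.length = L.length
instance (L : List (List Int)) (vector : List Int) : Decidable (Pre_LxV L vector) := by unfold Pre_LxV; infer_instance
def pvWitness_LxV : List (List Int) × List Int := ([[2, 0], [3, 4]], [5, 6])

def Spec_LxV (L : List (List Int)) (vector : List Int) (out : List Int) : Prop := out = LxV_alt L vector
instance (L : List (List Int)) (vector : List Int) (out : List Int) : Decidable (Spec_LxV L vector out) := by unfold Spec_LxV; infer_instance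

-- ===== CLAIM (what is proved, stated in full; the proofs are below) =====
def Claim_equal_LxV : Prop := ∀ (L : List (List Int)) (vector : List Int), Dom_LxV L vector → Pre_LxV L vector → Spec_LxV L vector (LxV L vector)

-- ===== LEMMAS AND PROOFS =====

-- the term added for cell (i, j)
def pvT (L : List (List Int)) (vector : List Int) (i j : Nat) : Int :=
  (L.getD i []).getD j 0 * vector.getD j 0

-- foldl-sum as a Finset sum
theorem pv_foldl_add_eq_sum (g : Nat → Int) (m : Nat) (c : Int) :
    (List.range m).foldl (fun s j => s + g j) c = c + ∑ j ∈ Finset.range m, g j := by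
  induction m generalizing c with
  | zero => simp
  | succ m ih =>
    rw [List.range_succ, List.foldl_append, Finset.sum_range_succ]
    simp [ih]
    ring

-- A-side: length and elementwise value
theorem pv_setfold_length (f : Nat → Int) (l : List Nat) (y : List Int) :
    (l.foldl (fun y i => y.set i (f i)) y).length = y.length := by
  induction l generalizing y with
  | nil => rfl
  | cons hd tl ih => simp [List.foldl, ih]

theorem pv_setfold_getD (f : Nat → Int) (l : List Nat) (y : List Int) (i : Nat)
    (hi : i < y.length) :
    (l.foldl (fun y i => y.set i (f i)) y).getD i 0 = if i ∈ l then f i else y.getD i 0 := by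
  induction l generalizing y with
  | nil => simp
  | cons hd tl ih =>
    simp only [List.foldl]
    rw [ih _ (by simpa using hi)]
    by_cases hmem : i ∈ tl
    · simp [hmem]
    · by_cases heq : i = hd
      · subst heq
        simp [hmem, List.getD_eq_getElem?_getD, List.getElem?_set_self (by simpa using hi)]
      · simp [hmem, heq, List.getD_eq_getElem?_getD, List.getElem?_set_ne (fun h => heq h.symm)]

theorem pv_A_getD (L : List (List Int)) (vector : List Int) (i : Nat) (hi : i < L.length) :
    (LxV L vector).getD i 0 = ∑ j ∈ Finset.range (i + 1), pvT L vector i j := by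
  unfold LxV
  rw [pv_setfold_getD _ _ _ i (by simpa using hi)]
  simp only [List.mem_range, hi, if_pos]
  rw [pv_foldl_add_eq_sum (fun j => (L.getD i []).getD j 0 * vector.getD j 0) (i + 1) 0]
  simp [pvT]

theorem pv_A_length (L : List (List Int)) (vector : List Int) :
    (LxV L vector).length = L.length := by
  unfold LxV
  simp [pv_setfold_length]

-- B-side: zip dot product as a Finset sum
theorem pv_dot_eq_sum (a b : List Int) (c : Int) :
    (a.zip b).foldl (fun s p => s + p.1 * p.2) c =
      c + ∑ j ∈ Finset.range (min a.length b.length), a.getD j 0 * b.getD j 0 := by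
  induction a generalizing b c with
  | nil => simp
  | cons x xs ih =>
    cases b with
    | nil => simp
    | cons y ys =>
      simp only [List.zip_cons_cons, List.foldl_cons]
      rw [ih ys (c + x * y)]
      rw [show min (x :: xs).length (y :: ys).length = (min xs.length ys.length) + 1 by
        simp [Nat.succ_min_succ]]
      rw [Finset.sum_range_succ']
      simp
      ring

-- B-side loop characterisation
theorem pv_loop_eq (rows : List (List Int)) (vec : List Int) (ys : List Int)
    (hv : vec.length = rows.length) :
    pvLoop rows vec ys =
      ys ++ ((List.range rows.length).map
        (fun i => pvDot (rows.getD i []) (vec.take (i + 1)))).reverse := by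
  induction hm : rows.length generalizing rows vec ys with
  | zero =>
    have : rows = [] := List.eq_nil_of_length_eq_zero hm
    subst this; simp [pvLoop]
  | succ m ih =>
    have hne : rows ≠ [] := by intro h; subst h; simp at hm
    obtain ⟨r, rs, hcons⟩ := List.exists_cons_of_ne_nil hne
    subst hcons
    rw [pvLoop]
    · rw [ih (r :: rs).dropLast vec.dropLast _
        (by simp at hv ⊢; omega) (by simp at hm ⊢; omega)]
      rw [List.range_succ, List.map_append, List.reverse_append]
      simp only [List.map_cons, List.map_nil, List.reverse_cons, List.reverse_nil,
        List.nil_append, List.append_assoc, List.singleton_append]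
      -- the last appended dot equals the i = m entry
      have hlast : (r :: rs).getLast (by simp) = (r :: rs).getD m [] := by
        rw [List.getLast_eq_getElem]
        simp [List.getD_eq_getElem?_getD, hm]
      have hvt : vec.take (m + 1) = vec := by
        apply List.take_of_length_le; omega
      congr 1
      rw [hlast, hvt]
      -- the recursive entries coincide
      congr 2
      apply List.map_congr_left
      intro i hi
      rw [List.mem_range] at hi
      have h1 : (r :: rs).dropLast.getD i [] = (r :: rs).getD i [] := by
        simp [List.getD_eq_getElem?_getD,
          List.getElem?_eq_getElem
            (by simp [List.length_dropLast] at hm ⊢; omega : i < (r :: rs).dropLast.length),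
          List.getElem?_eq_getElem (by omega : i < (r :: rs).length),
          List.getElem_dropLast]
      have h2 : vec.dropLast.take (i + 1) = vec.take (i + 1) := by
        rw [List.dropLast_eq_take, List.take_take]
        congr 1
        simp at hv hm
        omega
      rw [h1, h2]

-- B as a map over range, under Pre_
theorem pv_B_eq (L : List (List Int)) (vector : List Int)
    (hv : vector.length = L.length) (hrow : ∀ row ∈ L, row.length = L.length) :
    LxV_alt L vector =
      (List.range L.length).map (fun i => ∑ j ∈ Finset.range (i + 1), pvT L vector i j) := by
  unfold LxV_alt
  rw [pv_loop_eq L vector [] hv]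
  simp only [List.nil_append, List.reverse_reverse]
  apply List.map_congr_left
  intro i hi
  rw [List.mem_range] at hi
  unfold pvDot
  rw [pv_dot_eq_sum]
  have hgd : L.getD i [] = L[i]'(by omega) := by
    simp [List.getD_eq_getElem?_getD, List.getElem?_eq_getElem (by omega : i < L.length)]
  have hrl : (L.getD i []).length = L.length := by
    rw [hgd]; exact hrow _ (List.getElem_mem _)
  have htl : (vector.take (i + 1)).length = i + 1 := by
    rw [List.length_take]; omega
  rw [hrl, htl]
  have hmin : min L.length (i + 1) = i + 1 := by omega
  rw [hmin]
  simp only [zero_add]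
  apply Finset.sum_congr rfl
  intro j hj
  rw [Finset.mem_range] at hj
  unfold pvT
  congr 1
  simp [List.getD_eq_getElem?_getD, List.getElem?_take_of_lt hj]

-- ===== VERDICT (by name: the statement is the Claim_ definition above) =====
theorem LxV_spec : Claim_equal_LxV := by
  intro L vector _ hpre
  obtain ⟨hv, hrow⟩ := hpre
  unfold Spec_LxV
  rw [pv_B_eq L vector hv hrow]
  apply List.ext_getElem
  · simp [pv_A_length]
  · intro i h1 h2
    have hi : i < L.length := by rw [pv_A_length] at h1; exact h1
    have hA : (LxV L vector)[i] = (LxV L vector).getD i 0 := by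
      simp [List.getD_eq_getElem?_getD, List.getElem?_eq_getElem h1]
    rw [hA, pv_A_getD L vector i hi]
    simp
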